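-- pv_equiv track=rewrite | github.com/konkolyseismolab/autoeap | src/autoeapcore.py | apdrawer
-- ===== SOURCE A (Python) =====
-- def apdrawer(intgrid):
--     down=[];up=[];left=[];right=[]
--     for i, eachline in enumerate(intgrid):
--         for j, each in enumerate(eachline):
--             if each==1:
--                 down.append([[j,j+1],[i,i]])
--                 up.append([[j,j+1],[i+1,i+1]])
--                 left.append([[j,j],[i,i+1]])
--                 right.append([[j+1,j+1],[i,i+1]])
--
--     together=[]
--     for each in down: together.append(each)
--     for each in up: together.append(each)
--     for each in left: together.append(each)
--     for each in right: together.append(each)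
--
--     filtered=[]
--     for each in together:
--         c=0
--         for EACH in together:
--             if each==EACH:
--                 c+=1
--         if c==1:
--             filtered.append(each)
--
--     return filtered
-- ===== SOURCE B (Python) =====
-- def apdrawer(intgrid):
--     ones = [(i, j) for i, row in enumerate(intgrid) for j, v in enumerate(row) if v == 1]
--
--     def is1(i, j):
--         return (0 <= i < len(intgrid) and 0 <= j < len(intgrid[i])
--                 and intgrid[i][j] == 1)
--
--     out = []
--     for (i, j) in ones:
--         if not is1(i - 1, j):
--             out.append([[j, j + 1], [i, i]])
--     for (i, j) in ones:
--         if not is1(i + 1, j):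
--             out.append([[j, j + 1], [i + 1, i + 1]])
--     for (i, j) in ones:
--         if not is1(i, j - 1):
--             out.append([[j, j], [i, i + 1]])
--     for (i, j) in ones:
--         if not is1(i, j + 1):
--             out.append([[j + 1, j + 1], [i, i + 1]])
--     return out
-- ===== Notes on version B (the rewrite author's own statement) =====
-- stated objective: alternative
-- what changed: Instead of materialising all four edges of every 1-cell and then counting each edge's occurrences in the combined list to keep the unique ones, B collects the 1-cells once and emits each direction's edge directly when the corresponding neighbour cell is not 1, which is exactly when that edge occurs once.
import Mathlib
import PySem

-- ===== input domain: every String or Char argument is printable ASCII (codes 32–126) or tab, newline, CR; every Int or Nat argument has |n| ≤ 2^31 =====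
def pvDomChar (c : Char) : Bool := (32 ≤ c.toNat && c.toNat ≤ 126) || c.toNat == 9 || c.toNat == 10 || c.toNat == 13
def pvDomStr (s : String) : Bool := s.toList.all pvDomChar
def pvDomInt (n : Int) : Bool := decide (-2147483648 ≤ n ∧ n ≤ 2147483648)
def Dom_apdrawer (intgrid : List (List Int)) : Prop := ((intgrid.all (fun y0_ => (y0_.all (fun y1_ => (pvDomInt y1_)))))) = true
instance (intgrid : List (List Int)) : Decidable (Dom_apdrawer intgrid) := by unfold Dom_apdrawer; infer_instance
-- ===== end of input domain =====

-- B replaces A's build-all-edges-then-count-occurrences pass by a single sweep that collects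
-- the 1-cells once and emits an edge exactly when the neighbouring cell is not 1 (alternative).


-- ===== PORT A =====
def apdrawer (intgrid : List (List Int)) : List (List (List Int)) :=
  -- the single loop building down/up/left/right as a fold over a 4-tuple state
  let st :=
    (PySem.List.enumerate intgrid).foldl
      (fun st p =>
        (PySem.List.enumerate p.2).foldl
          (fun st q =>
            if q.2 == 1 then
              (st.1 ++ [[[q.1, q.1 + 1], [p.1, p.1]]],
               st.2.1 ++ [[[q.1, q.1 + 1], [p.1 + 1, p.1 + 1]]],
               st.2.2.1 ++ [[[q.1, q.1], [p.1, p.1 + 1]]],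
               st.2.2.2 ++ [[[q.1 + 1, q.1 + 1], [p.1, p.1 + 1]]])
            else st)
          st)
      (([], [], [], []) :
        List (List (List Int)) × List (List (List Int)) ×
        List (List (List Int)) × List (List (List Int)))
  -- the four 'together.append' loops
  let t1 := st.1.foldl (fun acc e => acc ++ [e]) []
  let t2 := st.2.1.foldl (fun acc e => acc ++ [e]) t1
  let t3 := st.2.2.1.foldl (fun acc e => acc ++ [e]) t2
  let together := st.2.2.2.foldl (fun acc e => acc ++ [e]) t3
  -- the counting filter
  together.foldl
    (fun acc e =>
      if together.foldl (fun c E => if e == E then c + 1 else c) (0 : Int) = 1 then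
        acc ++ [e]
      else acc)
    []

-- ===== PORT B =====
-- B's helper is1: bounds-checked test 'cell (i, j) exists and holds 1'
def apIs1 (intgrid : List (List Int)) (i j : Int) : Bool :=
  if 0 ≤ i ∧ i < (intgrid.length : Int) then
    let row := intgrid.getD i.toNat []
    decide (0 ≤ j) && decide (j < (row.length : Int)) && (row.getD j.toNat 0 == 1)
  else false

-- B's 'ones' comprehension: the 1-cells in row-major order
def apOnes (intgrid : List (List Int)) : List (Int × Int) :=
  (PySem.List.enumerate intgrid).flatMap
    (fun p => (PySem.List.enumerate p.2).filterMap
      (fun q => if q.2 == 1 then some (p.1, q.1) else none))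

def apdrawer_alt (intgrid : List (List Int)) : List (List (List Int)) :=
  let os := apOnes intgrid
  (os.filterMap fun p =>
    if apIs1 intgrid (p.1 - 1) p.2 then none else some [[p.2, p.2 + 1], [p.1, p.1]]) ++
  (os.filterMap fun p =>
    if apIs1 intgrid (p.1 + 1) p.2 then none else some [[p.2, p.2 + 1], [p.1 + 1, p.1 + 1]]) ++
  (os.filterMap fun p =>
    if apIs1 intgrid p.1 (p.2 - 1) then none else some [[p.2, p.2], [p.1, p.1 + 1]]) ++
  (os.filterMap fun p =>
    if apIs1 intgrid p.1 (p.2 + 1) then none else some [[p.2 + 1, p.2 + 1], [p.1, p.1 + 1]])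

-- ===== PRECONDITION & SPEC =====
def Spec_apdrawer (intgrid : List (List Int)) (out : List (List (List Int))) : Prop := out = apdrawer_alt intgrid
instance (intgrid : List (List Int)) (out : List (List (List Int))) : Decidable (Spec_apdrawer intgrid out) := by unfold Spec_apdrawer; infer_instance

-- ===== CLAIM (what is proved, stated in full; the proofs are below) =====
def Claim_equal_apdrawer : Prop := ∀ (intgrid : List (List Int)), Dom_apdrawer intgrid → Spec_apdrawer intgrid (apdrawer intgrid)

-- ===== LEMMAS AND PROOFS =====

-- edge constructors (proof-side names for the four literal shapes)
def dnE (p : Int × Int) : List (List Int) := [[p.2, p.2 + 1], [p.1, p.1]]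
def upE (p : Int × Int) : List (List Int) := [[p.2, p.2 + 1], [p.1 + 1, p.1 + 1]]
def ltE (p : Int × Int) : List (List Int) := [[p.2, p.2], [p.1, p.1 + 1]]
def rtE (p : Int × Int) : List (List Int) := [[p.2 + 1, p.2 + 1], [p.1, p.1 + 1]]

theorem dnE_inj : Function.Injective dnE := by
  intro ⟨a,b⟩ ⟨c,d⟩ h
  simp only [dnE, List.cons.injEq] at h
  simp only [Prod.mk.injEq]
  omega
theorem upE_inj : Function.Injective upE := by
  intro ⟨a,b⟩ ⟨c,d⟩ h
  simp only [upE, List.cons.injEq] at h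
  simp only [Prod.mk.injEq]
  omega
theorem ltE_inj : Function.Injective ltE := by
  intro ⟨a,b⟩ ⟨c,d⟩ h
  simp only [ltE, List.cons.injEq] at h
  simp only [Prod.mk.injEq]
  omega
theorem rtE_inj : Function.Injective rtE := by
  intro ⟨a,b⟩ ⟨c,d⟩ h
  simp only [rtE, List.cons.injEq] at h
  simp only [Prod.mk.injEq]
  omega

-- filterMap with an 'if guard then none else some (f x)' body is filter-then-map
theorem filterMap_guard_none {α β : Type} (c : α → Bool) (f : α → β) (l : List α) :
    (l.filterMap fun x => if c x then none else some (f x)) =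
      (l.filter fun x => !c x).map f := by
  induction l with
  | nil => rfl
  | cons x xs ih => by_cases h : c x <;> simp [h, ih]

-- membership in apOnes is exactly apIs1
theorem mem_apOnes_iff (g : List (List Int)) (p : Int × Int) :
    p ∈ apOnes g ↔ apIs1 g p.1 p.2 = true := by
  unfold apOnes apIs1
  simp only [List.mem_flatMap, PySem.List.mem_enumerate_iff, List.mem_filterMap]
  constructor
  · rintro ⟨a, ⟨k, hk, rfl⟩, q, ⟨m, hm, rfl⟩, hq⟩
    split_ifs at hq with h1
    simp only [Option.some.injEq] at hq
    subst hq
    simp only [zero_add, Int.toNat_natCast] at *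
    rw [if_pos ⟨Int.natCast_nonneg k, by exact_mod_cast hk⟩]
    have hg : g.getD k [] = g[k] := by
      simp [List.getD_eq_getElem?_getD, List.getElem?_eq_getElem hk]
    simp only [hg]
    have hval : g[k].getD m 0 = g[k][m] := by
      simp [List.getD_eq_getElem?_getD, List.getElem?_eq_getElem hm]
    simp only [beq_iff_eq] at h1
    simp [h1, hm]
  · intro h
    split_ifs at h with h1
    simp only [Bool.and_eq_true, decide_eq_true_eq, beq_iff_eq] at h
    obtain ⟨⟨hj0, hjl⟩, hv⟩ := h
    have hk : p.1.toNat < g.length := by omega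
    have hg : g.getD p.1.toNat [] = g[p.1.toNat] := by
      simp [List.getD_eq_getElem?_getD, List.getElem?_eq_getElem hk]
    rw [hg] at hjl hv
    have hm : p.2.toNat < g[p.1.toNat].length := by omega
    have hval : g[p.1.toNat].getD p.2.toNat 0 = g[p.1.toNat][p.2.toNat] := by
      simp [List.getD_eq_getElem?_getD, List.getElem?_eq_getElem hm]
    rw [hval] at hv
    refine ⟨(p.1, g[p.1.toNat]), ⟨p.1.toNat, hk, Prod.ext (by simp; omega) rfl⟩,
      (p.2, g[p.1.toNat][p.2.toNat]), ⟨p.2.toNat, hm, Prod.ext (by simp; omega) rfl⟩, ?_⟩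
    rw [if_pos (by simp [hv])]
-- apOnes has no duplicates
theorem nodup_apOnes (g : List (List Int)) : (apOnes g).Nodup := by
  unfold apOnes
  rw [List.nodup_flatMap]
  refine ⟨?_, ?_⟩
  · intro p hp
    refine List.Nodup.filterMap ?_ ?_
    · intro a a' b hb hb'
      by_cases h1 : (a.2 == 1) = true <;> by_cases h2 : (a'.2 == 1) = true <;>
        simp [h1, h2] at hb hb'
      exact Prod.ext (congrArg Prod.snd (hb.trans hb'.symm))
        ((beq_iff_eq.mp h1).trans (beq_iff_eq.mp h2).symm)
    · exact (PySem.List.pairwise_lt_enumerate _ _).imp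
        (fun h heq => by rw [heq] at h; exact lt_irrefl _ h)
  · apply List.Pairwise.imp ?_ (PySem.List.pairwise_lt_enumerate _ _)
    intro a b hab
    simp only [Function.onFun, List.disjoint_left, List.mem_filterMap]
    rintro x ⟨q, _, hq⟩ ⟨q', _, hq'⟩
    split_ifs at hq hq'
    simp only [Option.some.injEq] at hq hq'
    have h3 : x.1 = a.1 := by rw [← hq]
    have h4 : x.1 = b.1 := by rw [← hq']
    omega
-- the count of a cell in apOnes is its apIs1 indicator
theorem count_apOnes (g : List (List Int)) (p : Int × Int) :
    (apOnes g).count p = if apIs1 g p.1 p.2 then 1 else 0 := by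
  by_cases h : apIs1 g p.1 p.2 = true
  · rw [if_pos h]
    exact List.count_eq_one_of_mem (nodup_apOnes g) ((mem_apOnes_iff g p).2 h)
  · rw [if_neg h, List.count_eq_zero]
    intro hm; exact h ((mem_apOnes_iff g p).1 hm)

-- shape disagreements: vertical edges never equal horizontal edges
theorem dnE_ne_ltE (p q : Int × Int) : dnE p ≠ ltE q := by
  simp only [dnE, ltE]; intro h; simp at h; omega
theorem dnE_ne_rtE (p q : Int × Int) : dnE p ≠ rtE q := by
  simp only [dnE, rtE]; intro h; simp at h; omega
theorem upE_ne_ltE (p q : Int × Int) : upE p ≠ ltE q := by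
  simp only [upE, ltE]; intro h; simp at h; omega
theorem upE_ne_rtE (p q : Int × Int) : upE p ≠ rtE q := by
  simp only [upE, rtE]; intro h; simp at h; omega

theorem count_zero_of_ne {α β : Type} [BEq β] [LawfulBEq β] (f : α → β) (l : List α) (e : β)
    (h : ∀ q, e ≠ f q) : (l.map f).count e = 0 := by
  rw [List.count_eq_zero]
  intro hm
  obtain ⟨q, _, hq⟩ := List.mem_map.1 hm
  exact h q hq.symm

-- cross identifications
theorem dnE_eq_upE (p : Int × Int) : dnE p = upE (p.1 - 1, p.2) := by simp [dnE, upE]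
theorem upE_eq_dnE (p : Int × Int) : upE p = dnE (p.1 + 1, p.2) := by simp [dnE, upE]
theorem ltE_eq_rtE (p : Int × Int) : ltE p = rtE (p.1, p.2 - 1) := by simp [ltE, rtE]
theorem rtE_eq_ltE (p : Int × Int) : rtE p = ltE (p.1, p.2 + 1) := by simp [ltE, rtE]

-- counts of one edge inside one mapped segment
theorem count_map_self (g : List (List Int)) (f : Int × Int → List (List Int))
    (hf : Function.Injective f) (p : Int × Int) :
    ((apOnes g).map f).count (f p) = if apIs1 g p.1 p.2 then 1 else 0 := by
  rw [List.count_map_of_injective _ _ hf, count_apOnes]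

theorem count_dn_up (g : List (List Int)) (p : Int × Int) :
    ((apOnes g).map upE).count (dnE p) = if apIs1 g (p.1 - 1) p.2 then 1 else 0 := by
  rw [dnE_eq_upE, List.count_map_of_injective _ _ upE_inj, count_apOnes]

theorem count_up_dn (g : List (List Int)) (p : Int × Int) :
    ((apOnes g).map dnE).count (upE p) = if apIs1 g (p.1 + 1) p.2 then 1 else 0 := by
  rw [upE_eq_dnE, List.count_map_of_injective _ _ dnE_inj, count_apOnes]

theorem count_lt_rt (g : List (List Int)) (p : Int × Int) :
    ((apOnes g).map rtE).count (ltE p) = if apIs1 g p.1 (p.2 - 1) then 1 else 0 := by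
  rw [ltE_eq_rtE, List.count_map_of_injective _ _ rtE_inj, count_apOnes]

theorem count_rt_lt (g : List (List Int)) (p : Int × Int) :
    ((apOnes g).map ltE).count (rtE p) = if apIs1 g p.1 (p.2 + 1) then 1 else 0 := by
  rw [rtE_eq_ltE, List.count_map_of_injective _ _ ltE_inj, count_apOnes]

-- the combined list of A, in normal form
def togetherN (g : List (List Int)) : List (List (List Int)) :=
  (apOnes g).map dnE ++ (apOnes g).map upE ++ (apOnes g).map ltE ++ (apOnes g).map rtE

-- A's quad-building fold computes the four mapped lists
theorem quad_fold (g : List (List Int)) (s : Int)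
    (d u l r : List (List (List Int))) :
    ((PySem.List.enumerate g s).foldl
      (fun st p =>
        (PySem.List.enumerate p.2).foldl
          (fun st q =>
            if q.2 == 1 then
              (st.1 ++ [[[q.1, q.1 + 1], [p.1, p.1]]],
               st.2.1 ++ [[[q.1, q.1 + 1], [p.1 + 1, p.1 + 1]]],
               st.2.2.1 ++ [[[q.1, q.1], [p.1, p.1 + 1]]],
               st.2.2.2 ++ [[[q.1 + 1, q.1 + 1], [p.1, p.1 + 1]]])
            else st)
          st)
      (d, u, l, r)) =
    (d ++ ((PySem.List.enumerate g s).flatMap (fun p => (PySem.List.enumerate p.2).filterMap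
        (fun q => if q.2 == 1 then some (p.1, q.1) else none))).map dnE,
     u ++ ((PySem.List.enumerate g s).flatMap (fun p => (PySem.List.enumerate p.2).filterMap
        (fun q => if q.2 == 1 then some (p.1, q.1) else none))).map upE,
     l ++ ((PySem.List.enumerate g s).flatMap (fun p => (PySem.List.enumerate p.2).filterMap
        (fun q => if q.2 == 1 then some (p.1, q.1) else none))).map ltE,
     r ++ ((PySem.List.enumerate g s).flatMap (fun p => (PySem.List.enumerate p.2).filterMap
        (fun q => if q.2 == 1 then some (p.1, q.1) else none))).map rtE) := by
  induction g generalizing s d u l r with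
  | nil => simp [PySem.List.enumerate_nil]
  | cons row rows ih =>
    rw [PySem.List.enumerate_cons, List.foldl_cons, List.flatMap_cons]
    have hrow : ∀ (d u l r : List (List (List Int))),
        ((PySem.List.enumerate row 0).foldl
          (fun st q =>
            if q.2 == 1 then
              (st.1 ++ [[[q.1, q.1 + 1], [s, s]]],
               st.2.1 ++ [[[q.1, q.1 + 1], [s + 1, s + 1]]],
               st.2.2.1 ++ [[[q.1, q.1], [s, s + 1]]],
               st.2.2.2 ++ [[[q.1 + 1, q.1 + 1], [s, s + 1]]])
            else st)
          (d, u, l, r)) =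
        (d ++ ((PySem.List.enumerate row 0).filterMap
            (fun q => if q.2 == 1 then some (s, q.1) else none)).map dnE,
         u ++ ((PySem.List.enumerate row 0).filterMap
            (fun q => if q.2 == 1 then some (s, q.1) else none)).map upE,
         l ++ ((PySem.List.enumerate row 0).filterMap
            (fun q => if q.2 == 1 then some (s, q.1) else none)).map ltE,
         r ++ ((PySem.List.enumerate row 0).filterMap
            (fun q => if q.2 == 1 then some (s, q.1) else none)).map rtE) := by
      intro d u l r
      induction PySem.List.enumerate row 0 generalizing d u l r with
      | nil => simp
      | cons q qs ihq =>
        by_cases hq : (q.2 == 1) = true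
        · simp only [List.foldl_cons, List.filterMap_cons, hq, if_true, ihq]
          simp [dnE, upE, ltE, rtE, List.append_assoc]
        · simp only [List.foldl_cons, List.filterMap_cons, hq, ihq]
          simp
    rw [hrow, ih, List.map_append, List.map_append, List.map_append, List.map_append]
    simp [List.append_assoc]

-- A's count-then-append loop over a fixed list is 'filter by count = 1'
theorem count_fold_eq (T : List (List (List Int))) :
    T.foldl (fun acc e =>
        if T.foldl (fun c E => if e == E then c + 1 else c) (0 : Int) = 1 then acc ++ [e]
        else acc) [] =
      T.filter (fun e => T.count e == 1) := by
  have h2 : (fun (acc : List (List (List Int))) e =>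
      if T.foldl (fun c E => if e == E then c + 1 else c) (0 : Int) = 1 then acc ++ [e]
      else acc) =
      (fun acc e => if (T.count e == 1) = true then acc ++ [e] else acc) := by
    funext acc e
    have hcomm : (fun (c : Int) E => if e == E then c + 1 else c)
        = (fun c E => if E == e then c + 1 else c) := by
      funext c E
      by_cases h : E = e
      · subst h; rfl
      · simp [h, Ne.symm h]
    rw [hcomm]
    have h1 : T.foldl (fun c E => if E == e then c + 1 else c) (0 : Int) = (T.count e : Int) := by
      have := PySem.List.foldl_beq_add_one T e 0
      simpa using this
    rw [h1]
    by_cases hc : T.count e = 1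
    · simp [hc]
    · have hics : (T.count e : Int) ≠ 1 := by exact_mod_cast hc
      simp [hc, hics]
  rw [h2, PySem.List.foldl_append_if_eq_filter]
  simp

-- A in normal form: filter the combined list by 'occurs exactly once'
theorem apdrawer_eq_filter (g : List (List Int)) :
    apdrawer g = (togetherN g).filter (fun e => (togetherN g).count e == 1) := by
  unfold apdrawer
  rw [quad_fold]
  simp only [PySem.List.foldl_append_singleton_eq_self, List.nil_append]
  rw [count_fold_eq]
  have ha : ∀ l : List (Int × Int),
      l.map dnE ++ l.map upE ++ l.map ltE ++ l.map rtE = togetherN g →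
      (l.map dnE ++ l.map upE ++ l.map ltE ++ l.map rtE).filter
          (fun e => (l.map dnE ++ l.map upE ++ l.map ltE ++ l.map rtE).count e == 1) =
        (togetherN g).filter (fun e => (togetherN g).count e == 1) := by
    intro l h; rw [h]
  exact ha _ (by simp [togetherN, apOnes])

-- count of each edge kind in the combined list
theorem count_dnE (g : List (List Int)) (p : Int × Int) :
    (togetherN g).count (dnE p) =
      (if apIs1 g p.1 p.2 then 1 else 0) + (if apIs1 g (p.1 - 1) p.2 then 1 else 0) := by
  unfold togetherN
  simp only [List.count_append]
  rw [count_map_self g dnE dnE_inj p, count_dn_up,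
      count_zero_of_ne ltE _ _ (fun q => dnE_ne_ltE p q),
      count_zero_of_ne rtE _ _ (fun q => dnE_ne_rtE p q)]
  simp

theorem count_upE (g : List (List Int)) (p : Int × Int) :
    (togetherN g).count (upE p) =
      (if apIs1 g (p.1 + 1) p.2 then 1 else 0) + (if apIs1 g p.1 p.2 then 1 else 0) := by
  unfold togetherN
  simp only [List.count_append]
  rw [count_up_dn, count_map_self g upE upE_inj p,
      count_zero_of_ne ltE _ _ (fun q => upE_ne_ltE p q),
      count_zero_of_ne rtE _ _ (fun q => upE_ne_rtE p q)]
  simp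

theorem count_ltE (g : List (List Int)) (p : Int × Int) :
    (togetherN g).count (ltE p) =
      (if apIs1 g p.1 p.2 then 1 else 0) + (if apIs1 g p.1 (p.2 - 1) then 1 else 0) := by
  unfold togetherN
  simp only [List.count_append]
  rw [count_zero_of_ne dnE _ _ (fun q => Ne.symm (dnE_ne_ltE q p)),
      count_zero_of_ne upE _ _ (fun q => Ne.symm (upE_ne_ltE q p)),
      count_map_self g ltE ltE_inj p, count_lt_rt]
  simp

theorem count_rtE (g : List (List Int)) (p : Int × Int) :
    (togetherN g).count (rtE p) =
      (if apIs1 g p.1 (p.2 + 1) then 1 else 0) + (if apIs1 g p.1 p.2 then 1 else 0) := by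
  unfold togetherN
  simp only [List.count_append]
  rw [count_zero_of_ne dnE _ _ (fun q => Ne.symm (dnE_ne_rtE q p)),
      count_zero_of_ne upE _ _ (fun q => Ne.symm (upE_ne_rtE q p)),
      count_rt_lt, count_map_self g rtE rtE_inj p]
  simp [Nat.add_comm]

-- for one edge kind: A's 'count = 1' filter over a mapped segment is B's neighbour filter
theorem segment_eq (g : List (List Int)) (f : Int × Int → List (List Int))
    (nb : Int × Int → Bool)
    (hc : ∀ p, p ∈ apOnes g →
      (((togetherN g).count (f p) == 1) : Bool) = !nb p) :
    ((apOnes g).map f).filter (fun e => (togetherN g).count e == 1) =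
      ((apOnes g).filter fun p => !nb p).map f := by
  rw [List.filter_map]
  congr 1
  apply List.filter_congr
  intro p hp
  exact hc p hp

-- ===== VERDICT (by name: the statement is the Claim_ definition above) =====
theorem apdrawer_spec : Claim_equal_apdrawer := by
  intro g _
  unfold Spec_apdrawer
  rw [apdrawer_eq_filter]
  simp only [apdrawer_alt]
  conv_rhs =>
    rw [filterMap_guard_none, filterMap_guard_none, filterMap_guard_none, filterMap_guard_none]
  have hT : togetherN g =
      (apOnes g).map dnE ++ ((apOnes g).map upE ++ ((apOnes g).map ltE ++ (apOnes g).map rtE)) := by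
    simp [togetherN, List.append_assoc]
  rw [hT, List.filter_append, List.filter_append, List.filter_append, ← hT]
  have hone : ∀ p ∈ apOnes g, apIs1 g p.1 p.2 = true := by
    intro p hp; exact (mem_apOnes_iff g p).1 hp
  rw [segment_eq g dnE (fun p => apIs1 g (p.1 - 1) p.2)
        (by intro p hp; rw [count_dnE, hone p hp]
            by_cases h : apIs1 g (p.1 - 1) p.2 = true <;> simp [h]),
      segment_eq g upE (fun p => apIs1 g (p.1 + 1) p.2)
        (by intro p hp; rw [count_upE, hone p hp]
            by_cases h : apIs1 g (p.1 + 1) p.2 = true <;> simp [h]),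
      segment_eq g ltE (fun p => apIs1 g p.1 (p.2 - 1))
        (by intro p hp; rw [count_ltE, hone p hp]
            by_cases h : apIs1 g p.1 (p.2 - 1) = true <;> simp [h]),
      segment_eq g rtE (fun p => apIs1 g p.1 (p.2 + 1))
        (by intro p hp; rw [count_rtE, hone p hp]
            by_cases h : apIs1 g p.1 (p.2 + 1) = true <;> simp [h])]
  simp only [List.append_assoc]
  rfl
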